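-- pv_equiv track=rewrite | github.com/rmstdope/advent-of-code | 2025/day11.py | solve
-- ===== SOURCE A (Python) =====
-- from functools import cache
--
-- def solve(part2, input) -> str:
--     data = input.splitlines()
--     sum1 = 0
--     graph = {}
--     for line in data:
--         parts = line.split(': ')
--         start = parts[0]
--         out = parts[1].split()
--         graph[start] = out
--
--     @cache
--     def num_paths(node, dac, fft):
--         if node == 'out':
--             if (dac and fft):
--                 return 1
--             else:
--                 return 0
--         if node not in graph:
--             return 0
--         s = 0
--         for neighbor in graph[node]:
--             new_dac = dac or (neighbor == 'dac')
--             new_fft = fft or (neighbor == 'fft')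
--             s += num_paths(neighbor, new_dac, new_fft)
--         return s
--     if part2:
--         sum1 = num_paths('svr', False, False)
--     else:
--         sum1 = num_paths('you', True, True)
--
--     return str(sum1)
-- ===== SOURCE B (Python) =====
-- def solve(part2, input) -> str:
--     graph = {}
--     for line in input.splitlines():
--         parts = line.split(': ')
--         graph[parts[0]] = parts[1].split()
--
--     def get(T, node, dac, fft):
--         if node == 'out':
--             return 1 if (dac and fft) else 0
--         if node not in graph:
--             return 0
--         return T[node][(dac, fft)]
--
--     flags = ((False, False), (False, True), (True, False), (True, True))
--     # T[k][(d,f)] after i rounds = number of paths of length <= i from k to 'out'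
--     # that (together with the already-accumulated flags d,f) visit 'dac' and 'fft'.
--     T = {k: {df: 0 for df in flags} for k in graph}
--     for _ in range(len(graph) + 1):
--         T = {k: {(d, f): sum(get(T, nb, d or nb == 'dac', f or nb == 'fft')
--                              for nb in graph[k])
--                  for (d, f) in flags}
--              for k in graph}
--     start, flag = ('svr', False) if part2 else ('you', True)
--     return str(get(T, start, flag, flag))
-- ===== Notes on version B (the rewrite author's own statement) =====
-- stated objective: alternative
-- what changed: Replaces A's top-down memoized recursion over (node, dac-flag, fft-flag) states by a bottom-up layered dynamic program: a table of path counts per node and flag pair is relaxed len(graph)+1 times (round i holds the counts over paths of length at most i), so the answer is read off the table instead of being produced by recursive calls.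
import Mathlib
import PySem

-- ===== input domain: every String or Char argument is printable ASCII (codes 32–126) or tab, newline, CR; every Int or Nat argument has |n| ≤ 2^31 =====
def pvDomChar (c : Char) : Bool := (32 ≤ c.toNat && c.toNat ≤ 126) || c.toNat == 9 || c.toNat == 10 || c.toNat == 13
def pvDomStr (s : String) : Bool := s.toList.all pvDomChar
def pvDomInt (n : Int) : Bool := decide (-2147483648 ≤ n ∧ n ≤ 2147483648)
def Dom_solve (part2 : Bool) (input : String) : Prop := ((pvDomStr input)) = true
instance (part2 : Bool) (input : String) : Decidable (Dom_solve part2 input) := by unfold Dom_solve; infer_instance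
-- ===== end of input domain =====

-- B replaces A's memoized flag-augmented recursion by a bottom-up layered DP (n+1 rounds of
-- Bellman-Ford-style relaxation over the graph's nodes); alternative decomposition, not faster.


-- ===== PORT A =====
-- graph building loop: graph[parts[0]] = parts[1].split()  (a line without ': ' raises IndexError
-- in Python: excluded by Pre_solve; the port skips such a line)
def parseGraph (data : List String) : PySem.Dict String (List String) :=
  data.foldl (fun g line =>
    match PySem.Str.split? line ": " with
    | some (s :: o :: _) => g.insert s (PySem.Str.split₀ o)
    | _ => g) PySem.Dict.empty

-- num_paths(node, dac, fft): literal recursion of A; the fuel argument only makes the recursion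
-- total in Lean (Python's recursion depth on inputs admitted by Pre_solve is at most
-- graph.size + 1, so the top-level fuel graph.size + 2 is never exhausted there)
def numPaths (g : PySem.Dict String (List String)) : Nat → String → Bool → Bool → Int
  | 0, _, _, _ => 0
  | fuel+1, node, dac, fft =>
    if node = "out" then (if dac && fft then 1 else 0)
    else match g.get? node with
      | none => 0
      | some nbs => nbs.foldl (fun s nb =>
          s + numPaths g fuel nb (dac || decide (nb = "dac")) (fft || decide (nb = "fft"))) 0

def solve (part2 : Bool) (input : String) : String :=
  let data := PySem.Str.splitlines input
  let graph := parseGraph data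
  let sum1 : Int := if part2 then numPaths graph (graph.size + 2) "svr" false false
                    else numPaths graph (graph.size + 2) "you" true true
  PySem.Int.toStr sum1

-- ===== PORT B =====
def parseGraphB (data : List String) : PySem.Dict String (List String) :=
  data.foldl (fun g line =>
    match PySem.Str.split? line ": " with
    | some (s :: o :: _) => g.insert s (PySem.Str.split₀ o)
    | _ => g) PySem.Dict.empty

-- get(T, node, dac, fft)
def bGet (g : PySem.Dict String (List String)) (T : PySem.Dict String (PySem.Dict (Bool × Bool) Int))
    (node : String) (dac fft : Bool) : Int :=
  if node = "out" then (if dac && fft then 1 else 0)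
  else if g.contains node then (T.getD node PySem.Dict.empty).getD (dac, fft) 0
  else 0

def bFlags : List (Bool × Bool) := [(false, false), (false, true), (true, false), (true, true)]

-- inner comprehension {(d,f): sum(...) for (d,f) in flags}
def bRow (g : PySem.Dict String (List String)) (T : PySem.Dict String (PySem.Dict (Bool × Bool) Int))
    (nbs : List String) : PySem.Dict (Bool × Bool) Int :=
  bFlags.foldl (fun r df =>
    r.insert df (nbs.foldl (fun s nb =>
      s + bGet g T nb (df.1 || decide (nb = "dac")) (df.2 || decide (nb = "fft"))) 0)) PySem.Dict.empty

-- outer comprehension {k: {...} for k in graph}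
def bStep (g : PySem.Dict String (List String)) (T : PySem.Dict String (PySem.Dict (Bool × Bool) Int)) :
    PySem.Dict String (PySem.Dict (Bool × Bool) Int) :=
  g.items.foldl (fun acc kv => acc.insert kv.1 (bRow g T kv.2)) PySem.Dict.empty

-- T = {k: {df: 0 for df in flags} for k in graph}
def bZeroRow : PySem.Dict (Bool × Bool) Int :=
  bFlags.foldl (fun r df => r.insert df 0) PySem.Dict.empty

def bInit (g : PySem.Dict String (List String)) : PySem.Dict String (PySem.Dict (Bool × Bool) Int) :=
  g.items.foldl (fun acc kv => acc.insert kv.1 bZeroRow) PySem.Dict.empty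

-- the 'for _ in range(len(graph) + 1)' loop
def bIter (g : PySem.Dict String (List String)) : Nat → PySem.Dict String (PySem.Dict (Bool × Bool) Int)
  | 0 => bInit g
  | i+1 => bStep g (bIter g i)

def solve_alt (part2 : Bool) (input : String) : String :=
  let graph := parseGraphB (PySem.Str.splitlines input)
  let T := bIter graph (graph.size + 1)
  if part2 then PySem.Int.toStr (bGet graph T "svr" false false)
  else PySem.Int.toStr (bGet graph T "you" true true)

-- ===== PRECONDITION & SPEC =====
-- Pre_solve admits exactly the inputs on which the Python A returns: every line must contain
-- ': ' (otherwise parts[1] raises IndexError), and no graph key may lie on a cycle reachable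
-- from the start node (otherwise the uncached recursion re-enters the same frame and Python
-- raises RecursionError).
def preGraph (input : String) : PySem.Dict String (List String) :=
  (PySem.Str.splitlines input).foldl (fun g line =>
    match PySem.Str.split? line ": " with
    | some (s :: o :: _) => g.insert s (PySem.Str.split₀ o)
    | _ => g) PySem.Dict.empty

-- one expansion round of the reachable set: add the successors of every non-'out' key in S
def preExpand (g : PySem.Dict String (List String)) (S : PySem.Set String) : PySem.Set String :=
  S.foldl (fun acc n =>
    if n = "out" then acc
    else match g.get? n with
      | some nbs => PySem.Set.update acc nbs
      | none => acc) S

def preReach (g : PySem.Dict String (List String)) (start : List String) : PySem.Set String :=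
  Nat.rec (PySem.Set.ofList start) (fun _ S => preExpand g S) (g.size + 2)

def Pre_solve (part2 : Bool) (input : String) : Prop :=
  (∀ line ∈ PySem.Str.splitlines input, ((PySem.Str.split? line ": ").getD []).length ≥ 2) ∧
  ¬ ∃ k ∈ (preGraph input).keys, k ≠ "out" ∧
      k ∈ preReach (preGraph input) [if part2 then "svr" else "you"] ∧
      k ∈ preReach (preGraph input) ((preGraph input).getD k [])

instance (part2 : Bool) (input : String) : Decidable (Pre_solve part2 input) := by
  unfold Pre_solve; infer_instance

def pvWitness_solve : Bool × String := (false, "you: out")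

def Spec_solve (part2 : Bool) (input : String) (out : String) : Prop := out = solve_alt part2 input
instance (part2 : Bool) (input : String) (out : String) : Decidable (Spec_solve part2 input out) := by unfold Spec_solve; infer_instance

-- ===== CLAIM (what is proved, stated in full; the proofs are below) =====
def Claim_equal_solve : Prop := ∀ (part2 : Bool) (input : String), Dom_solve part2 input → Pre_solve part2 input → Spec_solve part2 input (solve part2 input)

-- ===== LEMMAS AND PROOFS =====

-- keys of a parsed graph are unique
theorem nodup_keys_foldl_parse (data : List String) :
    ∀ (g : PySem.Dict String (List String)), g.keys.Nodup →
    (data.foldl (fun g line =>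
      match PySem.Str.split? line ": " with
      | some (s :: o :: _) => g.insert s (PySem.Str.split₀ o)
      | _ => g) g).keys.Nodup := by
  induction data with
  | nil => intro g hg; simpa using hg
  | cons a l ih =>
    intro g hg
    simp only [List.foldl_cons]
    cases h : PySem.Str.split? a ": " with
    | none => exact ih g hg
    | some parts =>
      match parts with
      | [] => exact ih g hg
      | [s] => exact ih g hg
      | s :: o :: rest => exact ih _ (PySem.Dict.nodup_keys_insert g s _ hg)

theorem nodup_keys_parseGraph (data : List String) : (parseGraph data).keys.Nodup :=
  nodup_keys_foldl_parse data PySem.Dict.empty PySem.Dict.nodup_keys_empty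

-- lookup after rebuilding a dict by inserting a value at every listed key, last write wins;
-- with distinct keys it is the first-match lookup of the pair list
theorem get?_foldl_insert_list {β : Type} (f : List String → β) (k : String) :
    ∀ (l : List (String × List String)) (acc : PySem.Dict String β),
    (l.map Prod.fst).Nodup →
    (l.foldl (fun acc kv => acc.insert kv.1 (f kv.2)) acc).get? k
      = (match l.find? (fun p => p.1 == k) with
         | some p => some (f p.2)
         | none => acc.get? k) := by
  intro l
  induction l with
  | nil => intro acc _; simp
  | cons a l ih =>
    intro acc hnd
    simp only [List.map_cons, List.nodup_cons] at hnd
    simp only [List.foldl_cons]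
    rw [ih _ hnd.2]
    by_cases hak : a.1 = k
    · have hfind : List.find? (fun p => p.1 == k) l = none := by
        rw [List.find?_eq_none]
        intro p hp hpk
        have hp1 : p.1 = k := by simpa using hpk
        exact hnd.1 (List.mem_map.mpr ⟨p, hp, by simp [hp1, hak]⟩)
      rw [hfind, List.find?_cons_of_pos (by simpa using hak)]
      rw [PySem.Dict.get?_insert]
      simp [hak]
    · rw [List.find?_cons_of_neg (by simpa using hak)]
      cases hfind : List.find? (fun p => p.1 == k) l with
      | none => simp [PySem.Dict.get?_insert, Ne.symm hak]
      | some p => rfl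

-- lookup in a dict rebuilt by inserting (f v) at every item (k, v) of g
theorem get?_foldl_insert_items {β : Type} (g : PySem.Dict String (List String))
    (f : List String → β) (hn : g.keys.Nodup) (k : String) :
    (g.items.foldl (fun acc kv => acc.insert kv.1 (f kv.2)) PySem.Dict.empty).get? k
      = (g.get? k).map f := by
  rw [get?_foldl_insert_list f k g.items PySem.Dict.empty (by simpa [PySem.Dict.keys] using hn)]
  cases hfind : List.find? (fun p => p.1 == k) g.items with
  | none => simp [PySem.Dict.get?, hfind, PySem.Dict.empty]
  | some p => simp [PySem.Dict.get?, hfind]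

theorem get?_bInit (g : PySem.Dict String (List String)) (hn : g.keys.Nodup) (k : String) :
    (bInit g).get? k = (g.get? k).map (fun _ => bZeroRow) :=
  get?_foldl_insert_items g (fun _ => bZeroRow) hn k

theorem get?_bStep (g : PySem.Dict String (List String)) (T : PySem.Dict String (PySem.Dict (Bool × Bool) Int))
    (hn : g.keys.Nodup) (k : String) :
    (bStep g T).get? k = (g.get? k).map (bRow g T) :=
  get?_foldl_insert_items g (bRow g T) hn k

-- row lookup in the 4-entry flag dict
theorem getD_bRow (g : PySem.Dict String (List String)) (T : PySem.Dict String (PySem.Dict (Bool × Bool) Int))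
    (nbs : List String) (d f : Bool) :
    (bRow g T nbs).getD (d, f) 0
      = nbs.foldl (fun s nb => s + bGet g T nb (d || decide (nb = "dac")) (f || decide (nb = "fft"))) 0 := by
  cases d <;> cases f <;>
    simp [bRow, bFlags, PySem.Dict.getD_insert]

theorem getD_bZeroRow (d f : Bool) : bZeroRow.getD (d, f) 0 = 0 := by
  cases d <;> cases f <;> simp [bZeroRow, bFlags, PySem.Dict.getD_insert]

theorem foldl_const_int {α : Type} (l : List α) (s : Int) : l.foldl (fun a _ => a) s = s := by
  induction l generalizing s <;> simp [*]

-- the heart: i rounds of B's DP agree with A's recursion at fuel i+1, at every node and flag pair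
theorem bGet_bIter_eq_numPaths (g : PySem.Dict String (List String)) (hn : g.keys.Nodup)
    (i : Nat) (node : String) (d f : Bool) :
    bGet g (bIter g i) node d f = numPaths g (i + 1) node d f := by
  induction i generalizing node d f with
  | zero =>
    unfold bGet numPaths bIter
    by_cases hout : node = "out"
    · simp [hout]
    · simp only [hout, if_false]
      cases hg : g.get? node with
      | none =>
        have hc : g.contains node = false := (PySem.Dict.get?_eq_none_iff_contains g node).mp hg
        simp [hc]
      | some nbs =>
        have hc : g.contains node = true := by
          by_contra h
          rw [(PySem.Dict.get?_eq_none_iff_contains g node).mpr (Bool.not_eq_true _ ▸ eq_false_of_ne_true h)] at hg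
          simp at hg
        have hr : (bInit g).getD node PySem.Dict.empty = bZeroRow := by
          simp [PySem.Dict.getD, get?_bInit g hn, hg]
        simp only [hc, if_true, hr, getD_bZeroRow]
        have hfun : (fun (s : Int) nb => s + numPaths g 0 nb (d || decide (nb = "dac")) (f || decide (nb = "fft")))
            = (fun (s : Int) (_ : String) => s) := by
          funext s nb; simp [numPaths]
        rw [hfun, foldl_const_int]
  | succ i ih =>
    unfold bGet numPaths bIter
    by_cases hout : node = "out"
    · simp [hout]
    · simp only [hout, if_false]
      cases hg : g.get? node with
      | none =>
        have hc : g.contains node = false := (PySem.Dict.get?_eq_none_iff_contains g node).mp hg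
        simp [hc]
      | some nbs =>
        have hc : g.contains node = true := by
          by_contra h
          rw [(PySem.Dict.get?_eq_none_iff_contains g node).mpr (Bool.not_eq_true _ ▸ eq_false_of_ne_true h)] at hg
          simp at hg
        have hr : (bStep g (bIter g i)).getD node PySem.Dict.empty = bRow g (bIter g i) nbs := by
          simp [PySem.Dict.getD, get?_bStep g (bIter g i) hn, hg]
        simp only [hc, if_true, hr, getD_bRow]
        have hfun : (fun (s : Int) nb => s + bGet g (bIter g i) nb (d || decide (nb = "dac")) (f || decide (nb = "fft")))
            = (fun (s : Int) nb => s + numPaths g (i + 1) nb (d || decide (nb = "dac")) (f || decide (nb = "fft"))) := by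
          funext s nb; rw [ih]
        rw [hfun]

-- ===== VERDICT (by name: the statement is the Claim_ definition above) =====
theorem solve_spec : Claim_equal_solve := by
  intro part2 input _ _
  unfold Spec_solve solve solve_alt
  have hg : parseGraphB (PySem.Str.splitlines input) = parseGraph (PySem.Str.splitlines input) := rfl
  rw [hg]
  set g := parseGraph (PySem.Str.splitlines input) with hgdef
  have hn : g.keys.Nodup := nodup_keys_parseGraph _
  have h := bGet_bIter_eq_numPaths g hn (g.size + 1)
  cases part2 <;> simp only [if_true, if_false, Bool.false_eq_true] <;> rw [h]
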